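-- pv_equiv track=rewrite | github.com/Faroock/Mbare-Market-backend | src/controllers/price_cards.py | get_quantity
-- ===== SOURCE A (Python) =====
-- def get_quantity(descr):
--     fst_sep = descr.replace('(','').replace(')','').split(' ')
--     num = 1
--     for word in fst_sep:
--         if word[0:1:] == 'x':
--             word = word[1::]
--         try:
--             num = int(word)
--         except ValueError:
--             pass
--     return num
-- ===== SOURCE B (Python) =====
-- def get_quantity(descr):
--     num = 1
--     tok = []
--     for ch in descr + ' ':
--         if ch == '(' or ch == ')':
--             continue
--         if ch == ' ':
--             word = ''.join(tok)
--             if word[0:1] == 'x':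
--                 word = word[1:]
--             try:
--                 num = int(word)
--             except ValueError:
--                 pass
--             tok = []
--         else:
--             tok.append(ch)
--     return num
-- ===== Notes on version B (the rewrite author's own statement) =====
-- stated objective: alternative
-- what changed: A builds two paren-stripped copies of the string and a split token list, then folds int() attempts over the tokens; B makes a single character-level scan that skips parens, accumulates the current token and flushes it with an int() attempt at each space, so no intermediate strings or token list are materialised.
import Mathlib
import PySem

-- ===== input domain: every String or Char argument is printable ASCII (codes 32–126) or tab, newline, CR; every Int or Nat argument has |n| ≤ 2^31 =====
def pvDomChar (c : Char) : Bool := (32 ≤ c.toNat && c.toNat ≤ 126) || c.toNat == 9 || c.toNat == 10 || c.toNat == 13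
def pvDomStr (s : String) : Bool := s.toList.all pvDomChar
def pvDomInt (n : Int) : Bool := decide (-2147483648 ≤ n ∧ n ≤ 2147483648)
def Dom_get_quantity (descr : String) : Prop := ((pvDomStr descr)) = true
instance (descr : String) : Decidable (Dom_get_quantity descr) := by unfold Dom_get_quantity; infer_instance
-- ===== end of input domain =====

-- B replaces A's replace/split/token-loop pipeline by one character-level scan that skips parens,
-- accumulates the current token and flushes it at each space (objective: alternative, same value).

-- ===== PORT A =====
-- one iteration of A's for-loop body: strip a single leading 'x', try int(word), keep num on ValueError
def pvStepA (num : Int) (word : String) : Int :=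
  let word := if PySem.Str.slice word (some 0) (some 1) == "x"
              then PySem.Str.slice word (some 1) none else word
  match PySem.Int.ofStr? word with
  | some n => n
  | none => num

def get_quantity (descr : String) : Int :=
  let fst_sep := (PySem.Str.split? (PySem.Str.replace (PySem.Str.replace descr "(" "") ")" "") " ").getD []
  fst_sep.foldl pvStepA 1

-- ===== PORT B =====
-- flush at a space: word = ''.join(tok); strip a single leading 'x'; int(word) or keep num
def pvFlushB (num : Int) (tok : List Char) : Int :=
  let word := if PySem.List.slice tok (some 0) (some 1) = ['x']
              then PySem.List.slice tok (some 1) none else tok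
  match PySem.Int.ofChars? word with
  | some n => n
  | none => num

-- one character of B's scan: skip parens, flush at a space, otherwise extend the current token
def pvStepB (st : Int × List Char) (ch : Char) : Int × List Char :=
  if ch = '(' || ch = ')' then st
  else if ch = ' ' then (pvFlushB st.1 st.2, [])
  else (st.1, st.2 ++ [ch])

def get_quantity_alt (descr : String) : Int :=
  ((descr ++ " ").toList.foldl pvStepB (1, [])).1

-- ===== PRECONDITION & SPEC =====
def Spec_get_quantity (descr : String) (out : Int) : Prop := out = get_quantity_alt descr
instance (descr : String) (out : Int) : Decidable (Spec_get_quantity descr out) := by unfold Spec_get_quantity; infer_instance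

-- ===== CLAIM (what is proved, stated in full; the proofs are below) =====
def Claim_equal_get_quantity : Prop := ∀ (descr : String), Dom_get_quantity descr → Spec_get_quantity descr (get_quantity descr)

-- ===== LEMMAS AND PROOFS =====

-- split on a single space, keeping empty pieces (always nonempty)
def pvSplitCh : List Char → List (List Char)
  | [] => [[]]
  | c :: t => if c = ' ' then [] :: pvSplitCh t
              else match pvSplitCh t with
                   | [] => [[c]]
                   | h :: r => (c :: h) :: r

-- prepend chars onto the first piece
def pvConsHead (p : List Char) : List (List Char) → List (List Char)
  | [] => [p]
  | h :: r => (p ++ h) :: r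

def pvAFold (num : Int) (ts : List (List Char)) : Int :=
  ts.foldl (fun n t => pvFlushB n t) num

theorem pvConsHead_consHead (p q : List Char) (xs : List (List Char)) :
    pvConsHead p (pvConsHead q xs) = pvConsHead (p ++ q) xs := by
  cases xs <;> simp [pvConsHead]

theorem pvSplitCh_cons_ne (c : Char) (t : List Char) (h : ¬ c = ' ') :
    pvSplitCh (c :: t) = pvConsHead [c] (pvSplitCh t) := by
  simp only [pvSplitCh, if_neg h]
  cases pvSplitCh t <;> rfl

theorem pvSplitCh_ne_nil (l : List Char) : pvSplitCh l ≠ [] := by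
  cases l with
  | nil => simp [pvSplitCh]
  | cons c t =>
    simp only [pvSplitCh]
    split_ifs
    · simp
    · cases pvSplitCh t <;> simp

theorem pvConsHead_nil_left (xs : List (List Char)) (h : xs ≠ []) : pvConsHead [] xs = xs := by
  cases xs with
  | nil => exact absurd rfl h
  | cons a r => simp [pvConsHead]

-- replace with a one-char pattern and empty replacement is a filter
theorem pvReplaceGo_filter (p : Char) (l : List Char) (fuel : Nat) (acc : List Char)
    (hf : l.length ≤ fuel) :
    PySem.Chars.replace.go [p] [] fuel l acc = acc.reverse ++ l.filter (fun c => !(c == p)) := by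
  induction l generalizing fuel acc with
  | nil => cases fuel <;> simp [PySem.Chars.replace.go]
  | cons c t ih =>
    cases fuel with
    | zero => simp at hf
    | succ f =>
      simp only [PySem.Chars.replace.go]
      by_cases hc : c = p
      · rw [if_pos (by simp [List.isPrefixOf, hc])]
        have hd : List.drop [p].length (c :: t) = t := rfl
        rw [hd, ih f ([].reverse ++ acc) (by simpa using Nat.le_of_succ_le_succ hf)]
        simp [hc]
      · rw [if_neg (by simp [List.isPrefixOf]; exact fun h => hc h.symm)]
        rw [ih f (c :: acc) (by simpa using Nat.le_of_succ_le_succ hf)]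
        simp [hc]

theorem pvReplace_filter (p : Char) (l : List Char) :
    PySem.Chars.replace l [p] [] = l.filter (fun c => !(c == p)) := by
  simpa [PySem.Chars.replace] using pvReplaceGo_filter p l l.length [] le_rfl

-- splitOn with a one-char separator is pvSplitCh
theorem pvSplitOnGo_splitCh (l : List Char) (fuel : Nat) (cur : List Char)
    (acc : List (List Char)) (hf : l.length ≤ fuel) :
    PySem.Chars.splitOn.go [' '] fuel l cur acc
      = acc.reverse ++ pvConsHead cur.reverse (pvSplitCh l) := by
  induction l generalizing fuel cur acc with
  | nil => cases fuel <;> simp [PySem.Chars.splitOn.go, pvSplitCh, pvConsHead]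
  | cons c t ih =>
    cases fuel with
    | zero => simp at hf
    | succ f =>
      simp only [PySem.Chars.splitOn.go]
      by_cases hc : c = ' '
      · subst hc
        rw [if_pos (by simp [List.isPrefixOf])]
        have hd : List.drop [' '].length (' ' :: t) = t := rfl
        rw [hd, ih f [] (cur.reverse :: acc) (by simpa using Nat.le_of_succ_le_succ hf)]
        have hsc : pvSplitCh (' ' :: t) = [] :: pvSplitCh t := by
          simp [pvSplitCh]
        rw [List.reverse_nil, pvConsHead_nil_left _ (pvSplitCh_ne_nil t), hsc]
        simp [pvConsHead]
      · rw [if_neg (by simp [List.isPrefixOf]; exact fun h => hc h.symm)]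
        rw [ih f (c :: cur) acc (by simpa using Nat.le_of_succ_le_succ hf)]
        rw [pvSplitCh_cons_ne c t hc, pvConsHead_consHead]
        simp

theorem pvSplitOn_splitCh (l : List Char) :
    PySem.Chars.splitOn l [' '] = pvSplitCh l := by
  have h := pvSplitOnGo_splitCh l (l.length + 1) [] [] (Nat.le_succ _)
  simp only [List.reverse_nil, List.nil_append] at h
  rw [pvConsHead_nil_left _ (pvSplitCh_ne_nil l)] at h
  simpa [PySem.Chars.splitOn] using h

-- A's loop body on a string = B's flush on its character list
theorem pvStepA_eq_flush (num : Int) (w : String) :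
    pvStepA num w = pvFlushB num w.toList := by
  simp only [pvStepA, pvFlushB, PySem.Int.ofStr?]
  have hx : (PySem.Str.slice w (some 0) (some 1) = "x")
      ↔ (PySem.List.slice w.toList (some 0) (some 1) = ['x']) := by
    rw [← String.toList_inj, PySem.Str.toList_slice, PySem.Chars.slice_eq_listSlice]
    have : ("x" : String).toList = ['x'] := by decide
    rw [this]
  by_cases h : PySem.List.slice w.toList (some 0) (some 1) = ['x']
  · rw [if_pos h, if_pos (by simpa [beq_iff_eq] using hx.mpr h)]
    rw [PySem.Str.toList_slice, PySem.Chars.slice_eq_listSlice]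
  · rw [if_neg h, if_neg (by simpa [beq_iff_eq] using fun hc => h (hx.mp hc))]

theorem pvFoldA_map (ts : List (List Char)) (num : Int) :
    (ts.map String.ofList).foldl pvStepA num = pvAFold num ts := by
  induction ts generalizing num with
  | nil => rfl
  | cons t r ih =>
    simp only [List.map_cons, List.foldl_cons, pvAFold, pvStepA_eq_flush,
      String.toList_ofList] at *
    exact ih _

-- main invariant of B's scan: processing cs ++ [' '] flushes exactly the tokens of the
-- paren-filtered suffix, prepended with the token accumulated so far
theorem pvScanB_main (cs : List Char) (num : Int) (tok : List Char) :
    (cs ++ [' ']).foldl pvStepB (num, tok)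
      = (pvAFold num (pvConsHead tok (pvSplitCh (cs.filter (fun c => !(c == '(' || c == ')'))))), []) := by
  induction cs generalizing num tok with
  | nil => simp [pvStepB, pvSplitCh, pvConsHead, pvAFold]
  | cons c t ih =>
    by_cases hp : c = '(' ∨ c = ')'
    · have h1 : pvStepB (num, tok) c = (num, tok) := by
        rcases hp with h | h <;> simp [pvStepB, h]
      have hfc : List.filter (fun c => !(c == '(' || c == ')')) (c :: t)
          = List.filter (fun c => !(c == '(' || c == ')')) t := by
        rcases hp with h | h <;> simp [h]
      simp only [List.cons_append, List.foldl_cons, h1, hfc]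
      exact ih num tok
    · have h1 : ¬ c = '(' := fun h => hp (Or.inl h)
      have h2 : ¬ c = ')' := fun h => hp (Or.inr h)
      have hfc : List.filter (fun c => !(c == '(' || c == ')')) (c :: t)
          = c :: List.filter (fun c => !(c == '(' || c == ')')) t := by
        simp [h1, h2]
      by_cases hs : c = ' '
      · subst hs
        have hstep : pvStepB (num, tok) ' ' = (pvFlushB num tok, []) := by
          simp [pvStepB]
        simp only [List.cons_append, List.foldl_cons, hstep, hfc]
        rw [ih (pvFlushB num tok) []]
        have hsc : pvSplitCh (' ' :: t.filter (fun c => !(c == '(' || c == ')')))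
            = [] :: pvSplitCh (t.filter (fun c => !(c == '(' || c == ')'))) := by
          simp [pvSplitCh]
        rw [hsc, pvConsHead_nil_left _ (pvSplitCh_ne_nil _)]
        cases h : pvSplitCh (t.filter (fun c => !(c == '(' || c == ')'))) with
        | nil => exact absurd h (pvSplitCh_ne_nil _)
        | cons a r => simp [pvConsHead, pvAFold]
      · have hstep : pvStepB (num, tok) c = (num, tok ++ [c]) := by
          simp [pvStepB, h1, h2, hs]
        simp only [List.cons_append, List.foldl_cons, hstep, hfc]
        rw [ih num (tok ++ [c])]
        rw [pvSplitCh_cons_ne c _ hs, pvConsHead_consHead]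

-- ===== VERDICT (by name: the statement is the Claim_ definition above) =====
theorem get_quantity_spec : Claim_equal_get_quantity := by
  intro descr _
  unfold Spec_get_quantity get_quantity get_quantity_alt
  have hsep : (" " : String).toList = [' '] := by decide
  have hop : ("(" : String).toList = ['('] := by decide
  have hcp : (")" : String).toList = [')'] := by decide
  have hem : ("" : String).toList = ([] : List Char) := by decide
  have hrep : (PySem.Str.replace (PySem.Str.replace descr "(" "") ")" "").toList
      = descr.toList.filter (fun c => !(c == '(' || c == ')')) := by
    rw [PySem.Str.toList_replace, PySem.Str.toList_replace, hop, hcp, hem]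
    rw [pvReplace_filter, pvReplace_filter, List.filter_filter]
    congr 1
    funext c
    by_cases h1 : c = '(' <;> by_cases h2 : c = ')' <;> simp [h1, h2, Bool.and_comm]
  have hsplit : PySem.Str.split? (PySem.Str.replace (PySem.Str.replace descr "(" "") ")" "") " "
      = some ((pvSplitCh (descr.toList.filter (fun c => !(c == '(' || c == ')')))).map String.ofList) := by
    rw [PySem.Str.split?, hsep, PySem.Chars.split?]
    rw [if_neg (by simp)]
    rw [hrep, pvSplitOn_splitCh]
    rfl
  rw [hsplit]
  simp only [Option.getD_some]
  rw [pvFoldA_map]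
  have hcat : (descr ++ " ").toList = descr.toList ++ [' '] := by
    rw [String.toList_append, hsep]
  rw [hcat, pvScanB_main descr.toList 1 []]
  rw [pvConsHead_nil_left _ (pvSplitCh_ne_nil _)]
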